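-- pv_equiv track=rewrite | github.com/jordanpaulchan/coding-challenges | lottery-ticket/lottery-ticket.py | lotto_picks_util
-- ===== SOURCE A (Python) =====
-- def lotto_picks_util(nums, idx, remaining, seen):
--     if idx >= len(nums):
--         if remaining == 0:
--             return [[]]
--         else:
--             return []
--     elif remaining == 1 and idx == len(nums) - 1:
--         if int(nums[idx]) > 0:
--             return [[nums[idx]]]
--         else:
--             return []
--     elif int(nums[idx]) == 0 or len(nums) - idx > 2 * remaining:
--         return []
--
--     picks = []
--     for i in range(1, 3):
--         if int(nums[idx:idx + i]) < 60 and nums[idx:idx + i] not in seen: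
--             seen.add(nums[idx:idx + i])
--             for pick in lotto_picks_util(nums, idx + i, remaining - 1, seen):
--                 picks.append([nums[idx:idx + i]] + pick)
--             seen.remove(nums[idx:idx + i])
--
--     return picks
-- ===== SOURCE B (Python) =====
-- def lotto_picks_util(nums, idx, remaining, seen):
--     # Iterative DFS with an explicit worklist stack instead of recursion.
--     # Each entry carries (index, remaining, prefix picked so far, path-local seen set).
--     # The length-2 branch is pushed before the length-1 branch, so popping explores
--     # length-1 first, reproducing the recursive left-to-right output order.
--     out = []
--     stack = [(idx, remaining, [], seen)]
--     while stack:
--         i, r, p, s = stack.pop()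
--         if i >= len(nums):
--             if r == 0:
--                 out.append(p)
--         elif r == 1 and i == len(nums) - 1:
--             if int(nums[i]) > 0:
--                 out.append(p + [nums[i]])
--         elif int(nums[i]) == 0 or len(nums) - i > 2 * r:
--             pass
--         else:
--             for k in (2, 1):
--                 seg = nums[i:i + k]
--                 if int(seg) < 60 and seg not in s:
--                     stack.append((i + k, r - 1, p + [seg], s | {seg}))
--     return out
-- ===== Notes on version B (the rewrite author's own statement) =====
-- stated objective: alternative
-- what changed: Replaces A's recursive backtracking (which mutates and restores a shared seen set) by an explicit iterative DFS over a worklist stack of (index, remaining, prefix, path-local seen) entries, pushing the length-2 branch before the length-1 branch so completions are emitted in A's left-to-right order.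
-- outside the precondition, e.g. on lotto_picks_util('0a', 0, 1, set()): A returns [], B returns []; on lotto_picks_util('12', -2, 1, set()): A returns [], B returns []
import Mathlib
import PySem

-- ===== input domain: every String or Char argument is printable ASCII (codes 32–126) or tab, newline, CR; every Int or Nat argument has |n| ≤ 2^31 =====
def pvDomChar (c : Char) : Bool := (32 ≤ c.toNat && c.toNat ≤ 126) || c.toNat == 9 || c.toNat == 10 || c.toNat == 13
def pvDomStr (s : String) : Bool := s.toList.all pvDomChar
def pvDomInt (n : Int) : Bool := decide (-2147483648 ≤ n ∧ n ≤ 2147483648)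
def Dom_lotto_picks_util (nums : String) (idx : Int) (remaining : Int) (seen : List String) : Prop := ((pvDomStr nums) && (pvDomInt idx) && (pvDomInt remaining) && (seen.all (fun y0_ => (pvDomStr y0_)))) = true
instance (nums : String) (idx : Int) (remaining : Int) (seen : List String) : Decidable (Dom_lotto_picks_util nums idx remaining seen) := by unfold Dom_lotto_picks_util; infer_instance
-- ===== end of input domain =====

-- B replaces A's recursive backtracking by an explicit iterative DFS over a worklist
-- stack of (index, remaining, prefix, path-local seen) entries (objective: alternative).
-- A mutates `seen` in Python (add then remove, net effect none); both ports are purely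
-- functional, so the equivalence is about the return value.
-- Both recursions terminate because a measure strictly decreases; each port carries that
-- measure as a structural Nat bound (the zero case is unreachable from the wrapper).

-- ===== PORT A =====
-- Literal port of A's recursion. nums[idx:idx+i] is lottoSeg nums idx i (and nums[idx]
-- is ported as the one-character slice lottoSeg nums idx 1 — identical for in-range idx;
-- out-of-range indices raise in Python and lie outside Pre_); int(…) is PySem.Int.ofStr?
-- with .getD 0, the total form under Pre_ (all-digit slices).
def lottoSeg (nums : String) (idx i : Int) : String :=
  PySem.Str.slice nums (some idx) (some (idx + i))

-- the inner 'for pick in lotto_picks_util(…): picks.append([seg] + pick)' loop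
def lottoAppend (seg : String) (rec picks : List (List String)) : List (List String) :=
  rec.foldl (fun acc pick => acc ++ [[seg] ++ pick]) picks

-- A's recursion, with fuel a structural upper bound on len(nums) - idx (the measure that
-- strictly decreases at each recursive call); fuel = 0 with idx < len(nums) is unreachable
-- from the wrapper below
def lottoGo (nums : String) (fuel : Nat) (idx remaining : Int) (seen : List String) : List (List String) :=
  let n : Int := PySem.Str.len nums
  if idx ≥ n then
    if remaining = 0 then [[]] else []
  else
    match fuel with
    | 0 => []
    | f + 1 =>
      if remaining = 1 ∧ idx = n - 1 then
        if (PySem.Int.ofStr? (lottoSeg nums idx 1)).getD 0 > 0 then [[lottoSeg nums idx 1]]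
        else []
      else if (PySem.Int.ofStr? (lottoSeg nums idx 1)).getD 0 = 0
              ∨ n - idx > 2 * remaining then []
      else
        -- for i in range(1, 3): two fixed iterations, unrolled; 'seen.add' is passed to
        -- the recursive call and the concluding 'seen.remove' restores the original set,
        -- so the second iteration uses `seen` again
        let picks : List (List String) := []
        let picks :=
          if (PySem.Int.ofStr? (lottoSeg nums idx 1)).getD 0 < 60
              ∧ ¬ PySem.Set.contains seen (lottoSeg nums idx 1) then
            lottoAppend (lottoSeg nums idx 1)
              (lottoGo nums f (idx + 1) (remaining - 1)
                (PySem.Set.add seen (lottoSeg nums idx 1))) picks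
          else picks
        let picks :=
          if (PySem.Int.ofStr? (lottoSeg nums idx 2)).getD 0 < 60
              ∧ ¬ PySem.Set.contains seen (lottoSeg nums idx 2) then
            lottoAppend (lottoSeg nums idx 2)
              (lottoGo nums f (idx + 2) (remaining - 1)
                (PySem.Set.add seen (lottoSeg nums idx 2))) picks
          else picks
        picks

def lotto_picks_util (nums : String) (idx : Int) (remaining : Int) (seen : List String) : List (List String) :=
  lottoGo nums ((PySem.Str.len nums - idx).toNat) idx remaining seen

-- ===== PORT B =====
-- Worklist loop of Source B: pop an entry, emit or push the k = 2 entry then the k = 1 entry;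
-- with the list head as stack top the new stack is push(1) ++ push(2) ++ rest.
-- lottoBPush is Source B's push of one branch: seg = nums[i:i+k]; guard; s | {seg} is
-- PySem.Set.union s [seg].
def lottoBPush (nums : String) (i r : Int) (p s : List String) (k : Int) :
    List (Int × Int × List String × List String) :=
  let seg := PySem.Str.slice nums (some i) (some (i + k))
  if (PySem.Int.ofStr? seg).getD 0 < 60 ∧ ¬ PySem.Set.contains s seg then
    [(i + k, r - 1, p ++ [seg], PySem.Set.union s [seg])]
  else []

-- the while loop, with fuel a structural upper bound on the stack measure
-- Σ 4^(len(nums) - entry index), which strictly decreases at every iteration;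
-- fuel = 0 with a non-empty stack is unreachable from the wrapper below
def lottoDfsB (nums : String) :
    Nat → List (Int × Int × List String × List String) → List (List String) → List (List String)
  | _, [], out => out
  | 0, _ :: _, out => out
  | f + 1, (i, r, p, s) :: rest, out =>
    let n : Int := PySem.Str.len nums
    if i ≥ n then
      lottoDfsB nums f rest (if r = 0 then out ++ [p] else out)
    else
      if r = 1 ∧ i = n - 1 then
        lottoDfsB nums f rest
          (if (PySem.Int.ofStr? (PySem.Str.slice nums (some i) (some (i + 1)))).getD 0 > 0 then
            out ++ [p ++ [PySem.Str.slice nums (some i) (some (i + 1))]]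
          else out)
      else if (PySem.Int.ofStr? (PySem.Str.slice nums (some i) (some (i + 1)))).getD 0 = 0
              ∨ n - i > 2 * r then
        lottoDfsB nums f rest out
      else
        lottoDfsB nums f (lottoBPush nums i r p s 1 ++ lottoBPush nums i r p s 2 ++ rest) out

def lotto_picks_util_alt (nums : String) (idx : Int) (remaining : Int) (seen : List String) : List (List String) :=
  lottoDfsB nums (4 ^ ((PySem.Str.len nums - idx).toNat)) [(idx, remaining, [], seen)] []

-- ===== PRECONDITION & SPEC =====
-- Pre_ admits every input with idx past the end of nums (A returns at once) and every
-- non-negative idx on an all-digit string; it excludes non-digit strings and negative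
-- idx (with idx < len), where A's int()/negative indexing generally raises
-- ValueError/IndexError — on a few such inputs an early guard still returns [] before
-- the failing int(), and B returns [] there too (see cites).
def Pre_lotto_picks_util (nums : String) (idx : Int) (remaining : Int) (seen : List String) : Prop :=
  PySem.Str.len nums ≤ idx ∨ (0 ≤ idx ∧ PySem.Str.strIsdigit nums = true)
instance (nums : String) (idx : Int) (remaining : Int) (seen : List String) : Decidable (Pre_lotto_picks_util nums idx remaining seen) := by unfold Pre_lotto_picks_util; infer_instance

def pvWitness_lotto_picks_util : String × Int × Int × List String := ("1234", 0, 2, [])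

def Spec_lotto_picks_util (nums : String) (idx : Int) (remaining : Int) (seen : List String) (out : List (List String)) : Prop := out = lotto_picks_util_alt nums idx remaining seen
instance (nums : String) (idx : Int) (remaining : Int) (seen : List String) (out : List (List String)) : Decidable (Spec_lotto_picks_util nums idx remaining seen out) := by unfold Spec_lotto_picks_util; infer_instance

-- ===== CLAIM (what is proved, stated in full; the proofs are below) =====
def Claim_equal_lotto_picks_util : Prop := ∀ (nums : String) (idx : Int) (remaining : Int) (seen : List String), Dom_lotto_picks_util nums idx remaining seen → Pre_lotto_picks_util nums idx remaining seen → Spec_lotto_picks_util nums idx remaining seen (lotto_picks_util nums idx remaining seen)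

-- ===== LEMMAS AND PROOFS =====

-- A's fuel only needs to dominate the measure len(nums) - idx
theorem pvGo_fuel_irrel (nums : String) :
    ∀ (f : Nat) (g : Nat) (idx remaining : Int) (seen : List String),
      (PySem.Str.len nums - idx).toNat ≤ f → (PySem.Str.len nums - idx).toNat ≤ g →
      lottoGo nums f idx remaining seen = lottoGo nums g idx remaining seen := by
  intro f
  induction f with
  | zero =>
    intro g idx remaining seen hf _
    rw [lottoGo.eq_def, lottoGo.eq_def]
    by_cases h : idx ≥ PySem.Str.len nums
    · have h' : (nums.length : Int) ≤ idx := by simpa [PySem.Str.len_eq] using h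
      simp [h']
    · omega
  | succ f ih =>
    intro g idx remaining seen hf hg
    rw [lottoGo.eq_def, lottoGo.eq_def]
    by_cases h : idx ≥ PySem.Str.len nums
    · have h' : (nums.length : Int) ≤ idx := by simpa [PySem.Str.len_eq] using h
      simp [h']
    · simp only [h, if_neg, not_false_iff]
      obtain ⟨g', rfl⟩ : ∃ g', g = g' + 1 := ⟨g - 1, by omega⟩
      rw [ih g' (idx + 1) (remaining - 1) _ (by omega) (by omega),
          ih g' (idx + 2) (remaining - 1) _ (by omega) (by omega)]

theorem pvGo_eq_lotto (nums : String) (f : Nat) (idx remaining : Int) (seen : List String)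
    (hf : (PySem.Str.len nums - idx).toNat ≤ f) :
    lottoGo nums f idx remaining seen = lotto_picks_util nums idx remaining seen := by
  unfold lotto_picks_util
  exact pvGo_fuel_irrel nums f _ idx remaining seen hf (by omega)

-- the stack measure for B's loop
def pvM (nums : String) (stack : List (Int × Int × List String × List String)) : Nat :=
  (stack.map (fun e => 4 ^ ((PySem.Str.len nums - e.1).toNat))).sum

theorem pvPow4_lt (m : Nat) (hm : 1 ≤ m) : 4 ^ (m - 1) + 4 ^ (m - 2) < 4 ^ m := by
  match m, hm with
  | 1, _ => decide
  | (m + 2), _ =>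
    have h4 : 0 < 4 ^ m := Nat.pow_pos (by norm_num)
    have e1 : m + 2 - 1 = m + 1 := by omega
    have e2 : m + 2 - 2 = m := by omega
    rw [e1, e2, pow_succ, pow_succ, pow_succ]
    nlinarith

theorem pvM_cons (nums : String) (e : Int × Int × List String × List String)
    (rest : List (Int × Int × List String × List String)) :
    pvM nums (e :: rest) = 4 ^ ((PySem.Str.len nums - e.1).toNat) + pvM nums rest := by
  simp [pvM]

theorem pvM_cons4 (nums : String) (i r : Int) (p s : List String)
    (rest : List (Int × Int × List String × List String)) :
    pvM nums ((i, r, p, s) :: rest) = 4 ^ ((PySem.Str.len nums - i).toNat) + pvM nums rest := by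
  simp [pvM]

theorem pvM_pos (nums : String) (e : Int × Int × List String × List String)
    (rest : List (Int × Int × List String × List String)) : 0 < pvM nums (e :: rest) := by
  rw [pvM_cons]
  have : 0 < 4 ^ ((PySem.Str.len nums - e.1).toNat) := Nat.pow_pos (by norm_num)
  omega

theorem pvPushSum (nums : String) (i r : Int) (p s : List String) (k : Int) :
    pvM nums (lottoBPush nums i r p s k) ≤ 4 ^ ((PySem.Str.len nums - (i + k)).toNat) := by
  simp only [pvM, lottoBPush]
  split_ifs <;> simp

theorem pvM_append (nums : String) (xs ys : List (Int × Int × List String × List String)) :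
    pvM nums (xs ++ ys) = pvM nums xs + pvM nums ys := by
  simp [pvM]

theorem pvPushM (nums : String) (i r : Int) (p s : List String)
    (rest : List (Int × Int × List String × List String)) (h : ¬ i ≥ PySem.Str.len nums) :
    pvM nums (lottoBPush nums i r p s 1 ++ lottoBPush nums i r p s 2 ++ rest)
      < pvM nums ((i, r, p, s) :: rest) := by
  rw [pvM_append, pvM_append, pvM_cons4]
  have h1 := pvPushSum nums i r p s 1
  have h2 := pvPushSum nums i r p s 2
  have e1 : (PySem.Str.len nums - (i + 1)).toNat = (PySem.Str.len nums - i).toNat - 1 := by omega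
  have e2 : (PySem.Str.len nums - (i + 2)).toNat = (PySem.Str.len nums - i).toNat - 2 := by omega
  have hp := pvPow4_lt ((PySem.Str.len nums - i).toNat) (by omega)
  rw [e1] at h1; rw [e2] at h2
  omega

-- the results contributed by one worklist entry: A's picks for that state, each prefixed
def pvEntryRes (nums : String) (e : Int × Int × List String × List String) : List (List String) :=
  (lotto_picks_util nums e.1 e.2.1 e.2.2.2).map (e.2.2.1 ++ ·)

theorem pvFlattenSingleton {α β : Type} (f : α → List β) (l : List α) :
    (l.map (fun x => [f x])).flatten = l.map f := by
  induction l with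
  | nil => simp
  | cons x xs ih => simp [ih]

theorem pvUnion_singleton (s : List String) (x : String) :
    PySem.Set.union s [x] = PySem.Set.add s x := rfl

-- one-step unfoldings of A at the wrapper fuel, phrased for the loop cases below
theorem pvLotto_ge (nums : String) (i r : Int) (s : List String)
    (h : i ≥ PySem.Str.len nums) :
    lotto_picks_util nums i r s = if r = 0 then [[]] else [] := by
  unfold lotto_picks_util
  rw [lottoGo.eq_def]
  have h' : (nums.length : Int) ≤ i := by simpa [PySem.Str.len_eq] using h
  simp [h']

theorem pvLotto_lt (nums : String) (i r : Int) (s : List String)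
    (h : ¬ i ≥ PySem.Str.len nums) :
    lotto_picks_util nums i r s =
      (if r = 1 ∧ i = PySem.Str.len nums - 1 then
        if (PySem.Int.ofStr? (lottoSeg nums i 1)).getD 0 > 0 then [[lottoSeg nums i 1]]
        else []
      else if (PySem.Int.ofStr? (lottoSeg nums i 1)).getD 0 = 0
              ∨ PySem.Str.len nums - i > 2 * r then []
      else
        let picks : List (List String) := []
        let picks :=
          if (PySem.Int.ofStr? (lottoSeg nums i 1)).getD 0 < 60
              ∧ ¬ PySem.Set.contains s (lottoSeg nums i 1) then
            lottoAppend (lottoSeg nums i 1)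
              (lotto_picks_util nums (i + 1) (r - 1)
                (PySem.Set.add s (lottoSeg nums i 1))) picks
          else picks
        let picks :=
          if (PySem.Int.ofStr? (lottoSeg nums i 2)).getD 0 < 60
              ∧ ¬ PySem.Set.contains s (lottoSeg nums i 2) then
            lottoAppend (lottoSeg nums i 2)
              (lotto_picks_util nums (i + 2) (r - 1)
                (PySem.Set.add s (lottoSeg nums i 2))) picks
          else picks
        picks) := by
  conv_lhs => unfold lotto_picks_util
  obtain ⟨f, hf⟩ : ∃ f, (PySem.Str.len nums - i).toNat = f + 1 :=
    ⟨(PySem.Str.len nums - i).toNat - 1, by omega⟩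
  rw [hf, lottoGo.eq_def]
  simp only [h, if_neg, not_false_iff]
  rw [pvGo_eq_lotto nums f (i + 1) (r - 1) _ (by omega),
      pvGo_eq_lotto nums f (i + 2) (r - 1) _ (by omega)]

-- the DFS loop returns the accumulated output followed by each entry's contribution
theorem pvDfs_eq (nums : String) :
    ∀ (fuel : Nat) (stack : List (Int × Int × List String × List String))
      (out : List (List String)), pvM nums stack ≤ fuel →
      lottoDfsB nums fuel stack out = out ++ stack.flatMap (pvEntryRes nums) := by
  intro fuel
  induction fuel with
  | zero =>
    intro stack out hm
    cases stack with
    | nil => simp [lottoDfsB]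
    | cons e rest => exact absurd hm (by have := pvM_pos nums e rest; omega)
  | succ f ih =>
    intro stack out hm
    cases stack with
    | nil => simp [lottoDfsB]
    | cons e rest =>
      obtain ⟨i, r, p, s⟩ := e
      rw [pvM_cons4] at hm
      have hpow : 0 < 4 ^ ((PySem.Str.len nums - i).toNat) := Nat.pow_pos (by norm_num)
      rw [lottoDfsB]
      by_cases h : i ≥ PySem.Str.len nums
      · rw [if_pos h]
        rw [ih rest _ (by omega), List.flatMap_cons]
        have hF : pvEntryRes nums (i, r, p, s) = if r = 0 then [p] else [] := by
          unfold pvEntryRes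
          rw [pvLotto_ge nums i r s h]
          split_ifs <;> simp
        rw [hF]
        split_ifs <;> simp
      · rw [if_neg h]
        by_cases h2 : r = 1 ∧ i = PySem.Str.len nums - 1
        · rw [if_pos h2]
          rw [ih rest _ (by omega), List.flatMap_cons]
          have hF : pvEntryRes nums (i, r, p, s) =
              (if (PySem.Int.ofStr? (PySem.Str.slice nums (some i) (some (i + 1)))).getD 0 > 0 then
                [p ++ [PySem.Str.slice nums (some i) (some (i + 1))]] else []) := by
            unfold pvEntryRes
            rw [pvLotto_lt nums i r s h, if_pos h2]
            simp only [lottoSeg]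
            split_ifs <;> simp
          rw [hF]
          split_ifs <;> simp
        · rw [if_neg h2]
          by_cases h3 : (PySem.Int.ofStr? (PySem.Str.slice nums (some i) (some (i + 1)))).getD 0 = 0
              ∨ PySem.Str.len nums - i > 2 * r
          · rw [if_pos h3]
            rw [ih rest _ (by omega), List.flatMap_cons]
            have hF : pvEntryRes nums (i, r, p, s) = [] := by
              unfold pvEntryRes
              rw [pvLotto_lt nums i r s h, if_neg h2]
              rw [if_pos (by simpa [lottoSeg] using h3)]
              simp
            rw [hF]
            simp
          · rw [if_neg h3]
            have hM := pvPushM nums i r p s rest h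
            rw [pvM_cons4] at hM
            rw [ih _ _ (by omega), List.flatMap_cons]
            have hA : lotto_picks_util nums i r s =
                (if (PySem.Int.ofStr? (PySem.Str.slice nums (some i) (some (i + 1)))).getD 0 < 60
                    ∧ ¬ PySem.Set.contains s (PySem.Str.slice nums (some i) (some (i + 1))) then
                  (lotto_picks_util nums (i + 1) (r - 1)
                      (PySem.Set.add s (PySem.Str.slice nums (some i) (some (i + 1))))).map
                    (fun pick => [PySem.Str.slice nums (some i) (some (i + 1))] ++ pick)
                else []) ++
                (if (PySem.Int.ofStr? (PySem.Str.slice nums (some i) (some (i + 2)))).getD 0 < 60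
                    ∧ ¬ PySem.Set.contains s (PySem.Str.slice nums (some i) (some (i + 2))) then
                  (lotto_picks_util nums (i + 2) (r - 1)
                      (PySem.Set.add s (PySem.Str.slice nums (some i) (some (i + 2))))).map
                    (fun pick => [PySem.Str.slice nums (some i) (some (i + 2))] ++ pick)
                else []) := by
              rw [pvLotto_lt nums i r s h, if_neg h2]
              rw [if_neg (by simpa [lottoSeg] using h3)]
              simp only [lottoSeg, lottoAppend]
              split_ifs <;> simp_all [pvFlattenSingleton]
            have hF : pvEntryRes nums (i, r, p, s) =
                (lottoBPush nums i r p s 1 ++ lottoBPush nums i r p s 2).flatMap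
                  (pvEntryRes nums) := by
              unfold pvEntryRes
              simp only [hA]
              simp only [lottoBPush]
              split_ifs <;>
                simp_all [pvUnion_singleton, List.map_map, Function.comp_def,
                  List.append_assoc]
            rw [List.flatMap_append] at hF ⊢
            rw [hF]
            simp

-- ===== VERDICT (by name: the statement is the Claim_ definition above) =====
theorem lotto_picks_util_spec : Claim_equal_lotto_picks_util := by
  intro nums idx remaining seen _ _
  unfold Spec_lotto_picks_util lotto_picks_util_alt
  rw [pvDfs_eq nums _ _ _ (by simp [pvM])]
  simp [pvEntryRes]
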